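-- pv_equiv track=rewrite | github.com/MarkoH17/StegArmory | processor.py | _get_range_keys
-- ===== SOURCE A (Python) =====
-- def _get_range_keys(pixel_difference):
--     wu_tsai_ranges = [
--         [0, 1, 1],
--         [2, 3, 1],
--         [4, 7, 2],
--         [8, 11, 2],
--         [12, 15, 2],
--         [16, 23, 3],
--         [24, 31, 3],
--         [32, 47, 4],
--         [48, 63, 4],
--         [64, 95, 5],
--         [96, 127, 5],
--         [128, 191, 6],
--         [192, 255, 6]
--     ]
--
--     for sub_range in wu_tsai_ranges:
--         if sub_range[0] <= pixel_difference <= sub_range[1]: # If pixel_difference belongs to a subrange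
--             return sub_range
-- ===== SOURCE B (Python) =====
-- import bisect
--
-- _WU_TSAI_RANGES = [
--     [0, 1, 1],
--     [2, 3, 1],
--     [4, 7, 2],
--     [8, 11, 2],
--     [12, 15, 2],
--     [16, 23, 3],
--     [24, 31, 3],
--     [32, 47, 4],
--     [48, 63, 4],
--     [64, 95, 5],
--     [96, 127, 5],
--     [128, 191, 6],
--     [192, 255, 6]
-- ]
--
-- _LOWERS = [r[0] for r in _WU_TSAI_RANGES]
--
--
-- def _get_range_keys(pixel_difference):
--     # The table covers [0, 255] contiguously: anything inside it falls in
--     # exactly one bucket, found by binary search on the lower bounds.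
--     if not (0 <= pixel_difference <= 255):
--         return None
--     return _WU_TSAI_RANGES[bisect.bisect_right(_LOWERS, pixel_difference) - 1]
-- ===== Notes on version B (the rewrite author's own statement) =====
-- stated objective: idiomatic
-- what changed: Replaces the linear scan over the range table by a bounds check plus bisect.bisect_right on a precomputed list of the lower bounds (binary search), indexing the table directly.
import Mathlib
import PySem

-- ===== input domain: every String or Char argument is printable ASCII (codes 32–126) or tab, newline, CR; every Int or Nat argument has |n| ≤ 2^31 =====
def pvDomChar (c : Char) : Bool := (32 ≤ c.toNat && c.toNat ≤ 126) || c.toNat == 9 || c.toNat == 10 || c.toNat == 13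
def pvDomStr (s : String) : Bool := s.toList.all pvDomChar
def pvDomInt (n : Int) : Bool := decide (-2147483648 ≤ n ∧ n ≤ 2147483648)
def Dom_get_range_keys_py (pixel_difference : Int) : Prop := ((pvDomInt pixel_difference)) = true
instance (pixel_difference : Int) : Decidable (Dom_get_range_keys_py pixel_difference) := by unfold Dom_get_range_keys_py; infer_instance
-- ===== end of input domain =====

-- ===== PORT A =====
-- B replaces A's linear scan of the range table by a bounds check plus a
-- binary search (bisect_right) over the precomputed lower bounds (idiomatic).

-- A: linear scan of the for-loop: first sub_range with sub_range[0] <= pd <= sub_range[1]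
def scanRangesA (pd : Int) : List (List Int) → Option (List Int)
  | [] => none
  | r :: rest =>
    match PySem.List.pyGet? r 0, PySem.List.pyGet? r 1 with
    | some a, some b => if a ≤ pd ∧ pd ≤ b then some r else scanRangesA pd rest
    | _, _ => none   -- IndexError (unreachable: every row of the literal table has 3 entries)

def get_range_keys_py (pixel_difference : Int) : Option (List Int) :=
  scanRangesA pixel_difference
    [[0, 1, 1], [2, 3, 1], [4, 7, 2], [8, 11, 2], [12, 15, 2], [16, 23, 3],
     [24, 31, 3], [32, 47, 4], [48, 63, 4], [64, 95, 5], [96, 127, 5],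
     [128, 191, 6], [192, 255, 6]]

-- ===== PORT B =====
def wuTsaiRanges : List (List Int) :=
  [[0, 1, 1], [2, 3, 1], [4, 7, 2], [8, 11, 2], [12, 15, 2], [16, 23, 3],
   [24, 31, 3], [32, 47, 4], [48, 63, 4], [64, 95, 5], [96, 127, 5],
   [128, 191, 6], [192, 255, 6]]

-- _LOWERS = [r[0] for r in _WU_TSAI_RANGES]  (r[0] never raises: rows are nonempty)
def wuLowers : List Int := wuTsaiRanges.map (fun r => (PySem.List.pyGet? r 0).getD 0)

-- bisect.bisect_right(a, x) restricted to the slice [lo, hi): CPython's 'while lo < hi'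
-- loop, with structural fuel ≥ hi - lo making the recursion total (fuel is never exhausted)
def bisectRightAux (a : List Int) (x : Int) : Nat → Nat → Nat → Nat
  | lo, _, 0 => lo
  | lo, hi, fuel + 1 =>
    if lo < hi then
      let mid := (lo + hi) / 2
      if x < a.getD mid 0 then bisectRightAux a x lo mid fuel
      else bisectRightAux a x (mid + 1) hi fuel
    else lo

def bisectRight (a : List Int) (x : Int) (lo hi : Nat) : Nat :=
  bisectRightAux a x lo hi (hi - lo)

def get_range_keys_py_alt (pixel_difference : Int) : Option (List Int) :=
  if 0 ≤ pixel_difference ∧ pixel_difference ≤ 255 then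
    -- index is always in range here (bisect_right returns ≥ 1 since lowers[0] = 0 ≤ pd)
    PySem.List.pyGet? wuTsaiRanges
      ((bisectRight wuLowers pixel_difference 0 wuLowers.length : Int) - 1)
  else none

-- ===== PRECONDITION & SPEC =====
def Spec_get_range_keys_py (pixel_difference : Int) (out : Option (List Int)) : Prop := out = get_range_keys_py_alt pixel_difference
instance (pixel_difference : Int) (out : Option (List Int)) : Decidable (Spec_get_range_keys_py pixel_difference out) := by unfold Spec_get_range_keys_py; infer_instance

-- ===== CLAIM (what is proved, stated in full; the proofs are below) =====
def Claim_equal_get_range_keys_py : Prop := ∀ (pixel_difference : Int), Dom_get_range_keys_py pixel_difference → Spec_get_range_keys_py pixel_difference (get_range_keys_py pixel_difference)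

-- ===== LEMMAS AND PROOFS =====

-- one step of A's scan on a 3-element row
theorem scan_cons (pd a b w : Int) (rest : List (List Int)) :
    scanRangesA pd ([a, b, w] :: rest) =
      if a ≤ pd ∧ pd ≤ b then some [a, b, w] else scanRangesA pd rest := rfl

-- both ports agree on every value in [0, 255], checked by evaluation
set_option maxRecDepth 40000 in
set_option maxHeartbeats 4000000 in
theorem agree_in_table : ∀ n : Fin 256,
    get_range_keys_py (n.val : Int) = get_range_keys_py_alt (n.val : Int) := by decide

set_option maxHeartbeats 1000000 in
theorem agree_all (pd : Int) : get_range_keys_py pd = get_range_keys_py_alt pd := by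
  by_cases h : 0 ≤ pd ∧ pd ≤ 255
  · have hlt : pd.toNat < 256 := by omega
    have := agree_in_table ⟨pd.toNat, hlt⟩
    simpa [Int.toNat_of_nonneg h.1] using this
  · -- out of range: the scan finds no bucket and B's guard fails
    have hb : get_range_keys_py_alt pd = none := by
      unfold get_range_keys_py_alt
      exact if_neg h
    rw [hb]
    simp only [get_range_keys_py]
    repeat rw [scan_cons, if_neg (by omega)]
    rfl

-- ===== VERDICT (by name: the statement is the Claim_ definition above) =====
theorem get_range_keys_py_spec : Claim_equal_get_range_keys_py := by
  intro pd _
  unfold Spec_get_range_keys_py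
  exact agree_all pd
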